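-- pv_equiv track=rewrite | github.com/saesac/baekjoon | 백준/Silver/32516. 팰린드롬 판별하기 2/팰린드롬 판별하기 2.py | min_queries_to_check_palindrome
-- ===== SOURCE A (Python) =====
-- def min_queries_to_check_palindrome(n, t):
--     queries = 0
--     left, right = 0, n - 1
--
--     while left < right:
--         if t[left] == '?' and t[right] == '?':
--             queries += 26
--         elif t[left] == '?' or t[right] == '?':
--             queries += 1
--         elif t[left] != t[right]:
--             return 0
--         left += 1
--         right -= 1
--
--     return queries
-- ===== SOURCE B (Python) =====
-- def min_queries_to_check_palindrome(n, t):
--     # Divide and conquer over the mirror-pair indices [lo, hi); each pair is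
--     # independent, and any hard mismatch makes the whole answer 0 (None).
--     def solve(lo, hi):
--         if hi <= lo:
--             return 0
--         if hi == lo + 1:
--             a, b = t[lo], t[n - 1 - lo]
--             if a == '?' and b == '?':
--                 return 26
--             if a == '?' or b == '?':
--                 return 1
--             return None if a != b else 0
--         mid = (lo + hi) // 2
--         L = solve(lo, mid)
--         R = solve(mid, hi)
--         return None if L is None or R is None else L + R
--
--     r = solve(0, n // 2)
--     return 0 if r is None else r
-- ===== Notes on version B (the rewrite author's own statement) =====
-- stated objective: alternative
-- what changed: Replaces A's linear two-pointer loop with early return by a divide-and-conquer recursion over the mirror-pair index interval that combines half-results and propagates None on a hard mismatch.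
import Mathlib
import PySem

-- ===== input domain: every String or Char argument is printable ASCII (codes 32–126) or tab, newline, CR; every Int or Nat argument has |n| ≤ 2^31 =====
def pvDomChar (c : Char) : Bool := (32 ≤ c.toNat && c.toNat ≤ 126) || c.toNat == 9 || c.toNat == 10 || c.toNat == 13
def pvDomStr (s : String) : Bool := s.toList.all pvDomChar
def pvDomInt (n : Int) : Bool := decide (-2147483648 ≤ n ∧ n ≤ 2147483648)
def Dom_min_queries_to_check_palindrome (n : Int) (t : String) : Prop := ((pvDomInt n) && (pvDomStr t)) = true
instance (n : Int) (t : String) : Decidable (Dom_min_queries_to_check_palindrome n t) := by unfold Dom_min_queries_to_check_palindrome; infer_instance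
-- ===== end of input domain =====

-- B replaces A's early-exiting two-pointer loop by a divide-and-conquer recursion
-- over the mirror-pair index interval (alternative decomposition, same cost).


-- ===== PORT A =====
-- A's while loop; pyGet? = Python indexing, none = IndexError (excluded by Pre_).
def pvALoop (s : List Char) (left right queries : Int) : Int :=
  if left < right then
    match PySem.List.pyGet? s left, PySem.List.pyGet? s right with
    | some a, some b =>
      if a = '?' ∧ b = '?' then pvALoop s (left + 1) (right - 1) (queries + 26)
      else if a = '?' ∨ b = '?' then pvALoop s (left + 1) (right - 1) (queries + 1)
      else if a ≠ b then 0
      else pvALoop s (left + 1) (right - 1) queries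
    | _, _ => 0   -- IndexError in Python; outside Pre_
  else queries
termination_by (right - left).toNat
decreasing_by all_goals omega

def min_queries_to_check_palindrome (n : Int) (t : String) : Int :=
  pvALoop t.toList 0 (n - 1) 0

-- ===== PORT B =====
-- Source B's solve(lo, hi): divide and conquer on the pair-index interval [lo, hi);
-- t[lo], t[n-1-lo] ported as pyGet? (none = IndexError in Python, outside Pre_).
def pvSolve (s : List Char) (n lo hi : Int) : Option Int :=
  if hi ≤ lo then some 0
  else if hi = lo + 1 then
    match PySem.List.pyGet? s lo, PySem.List.pyGet? s (n - 1 - lo) with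
    | some a, some b =>
      if a = '?' ∧ b = '?' then some 26
      else if a = '?' ∨ b = '?' then some 1
      else if a ≠ b then none else some 0
    | _, _ => none   -- IndexError in Python; outside Pre_
  else
    let mid := PySem.Int.floordiv (lo + hi) 2
    match pvSolve s n lo mid, pvSolve s n mid hi with
    | some L, some R => some (L + R)
    | _, _ => none
termination_by (hi - lo).toNat
decreasing_by
  all_goals
    have h2 : PySem.Int.floordiv (lo + hi) 2 = (lo + hi) / 2 :=
      PySem.Int.floordiv_eq_ediv_of_pos (by omega)
    omega

def min_queries_to_check_palindrome_alt (n : Int) (t : String) : Int :=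
  match pvSolve t.toList n 0 (PySem.Int.floordiv n 2) with
  | none => 0
  | some v => v

-- ===== PRECONDITION & SPEC =====
-- Pre_ excludes exactly the inputs where Python A raises IndexError: n exceeding
-- len(t) with at least one loop iteration (n ≥ 2).
def Pre_min_queries_to_check_palindrome (n : Int) (t : String) : Prop :=
  n ≤ (t.toList.length : Int) ∨ n ≤ 1
instance (n : Int) (t : String) : Decidable (Pre_min_queries_to_check_palindrome n t) := by unfold Pre_min_queries_to_check_palindrome; infer_instance
def pvWitness_min_queries_to_check_palindrome : Int × String := (5, "a?cBa")

def Spec_min_queries_to_check_palindrome (n : Int) (t : String) (out : Int) : Prop := out = min_queries_to_check_palindrome_alt n t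
instance (n : Int) (t : String) (out : Int) : Decidable (Spec_min_queries_to_check_palindrome n t out) := by unfold Spec_min_queries_to_check_palindrome; infer_instance

-- ===== CLAIM (what is proved, stated in full; the proofs are below) =====
def Claim_equal_min_queries_to_check_palindrome : Prop := ∀ (n : Int) (t : String), Dom_min_queries_to_check_palindrome n t → Pre_min_queries_to_check_palindrome n t → Spec_min_queries_to_check_palindrome n t (min_queries_to_check_palindrome n t)

-- ===== LEMMAS AND PROOFS =====

-- A mirror pair (as Options) is a hard mismatch / costs 26, 1 or 0.
def pvBad : Option Char × Option Char → Bool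
  | (some a, some b) => a ≠ '?' && b ≠ '?' && a ≠ b
  | _ => true

def pvScore : Option Char × Option Char → Int
  | (some a, some b) =>
      if a = '?' ∧ b = '?' then 26 else if a = '?' ∨ b = '?' then 1 else 0
  | _ => 0

-- The window of mirror pairs A's loop visits, in loop order.
def pvWin (s : List Char) (left right : Int) : List (Option Char × Option Char) :=
  if left < right then
    (PySem.List.pyGet? s left, PySem.List.pyGet? s right) :: pvWin s (left + 1) (right - 1)
  else []
termination_by (right - left).toNat
decreasing_by all_goals omega

-- A's loop = "0 on any bad pair in the window, else queries + total score".
theorem pvALoop_eq_win (s : List Char) (left right queries : Int) :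
    pvALoop s left right queries =
      if (pvWin s left right).any pvBad then 0
      else queries + ((pvWin s left right).map pvScore).sum := by
  fun_induction pvALoop s left right queries with
  | case1 l r q hlt a b ha hb hq ih =>
      rw [pvWin, if_pos hlt, ha, hb, ih]
      have hbad : pvBad (some a, some b) = false := by simp [pvBad, hq.1]
      have hsc : pvScore (some a, some b) = 26 := by simp [pvScore, hq.1, hq.2]
      simp only [List.any_cons, hbad, Bool.false_or, List.map_cons, List.sum_cons, hsc]
      split <;> omega
  | case2 l r q hlt a b ha hb hq hq1 ih =>
      rw [pvWin, if_pos hlt, ha, hb, ih]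
      have hbad : pvBad (some a, some b) = false := by
        rcases hq1 with h | h <;> simp [pvBad, h]
      have hsc : pvScore (some a, some b) = 1 := by simp [pvScore, hq, hq1]
      simp only [List.any_cons, hbad, Bool.false_or, List.map_cons, List.sum_cons, hsc]
      split <;> omega
  | case3 l r q hlt a b ha hb hq hq1 hne =>
      rw [pvWin, if_pos hlt, ha, hb]
      have hbad : pvBad (some a, some b) = true := by
        push Not at hq1
        simp [pvBad, hq1.1, hq1.2, hne]
      simp [hbad]
  | case4 l r q hlt a b ha hb hq hq1 hne ih =>
      rw [pvWin, if_pos hlt, ha, hb, ih]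
      push Not at hq1
      have hbad : pvBad (some a, some b) = false := by simp [pvBad, of_not_not hne]
      have hsc : pvScore (some a, some b) = 0 := by simp [pvScore, hq1.1, hq1.2]
      simp only [List.any_cons, hbad, Bool.false_or, List.map_cons, List.sum_cons, hsc]
      split <;> omega
  | case5 l r q hlt ha =>
      rw [pvWin, if_pos hlt]
      have hbad : pvBad (PySem.List.pyGet? s l, PySem.List.pyGet? s r) = true := by
        cases hl : PySem.List.pyGet? s l <;> cases hr : PySem.List.pyGet? s r <;>
          simp [pvBad] <;> exact absurd (ha _ _ hl hr) (by simp)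
      simp [hbad]
  | case6 l r q hnlt =>
      rw [pvWin, if_neg hnlt]; simp

-- The window is exactly the pair list over range(n//2) (left+right is loop-invariant).
theorem pvWin_eq_range (s : List Char) (left right : Int) :
    pvWin s left right =
      (PySem.List.pyRange left (PySem.Int.floordiv (left + right + 1) 2) 1).map
        (fun i => (PySem.List.pyGet? s i, PySem.List.pyGet? s (left + right - i))) := by
  fun_induction pvWin s left right with
  | case1 l r hlt ih =>
      have hfd : PySem.Int.floordiv (l + r + 1) 2 = (l + r + 1) / 2 :=
        PySem.Int.floordiv_eq_ediv_of_pos (by omega)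
      have hc : l + 1 + (r - 1) = l + r := by ring
      rw [PySem.List.pyRange_one_cons (by rw [hfd]; omega), ih, hc]
      simp only [List.map_cons]
      have hr : l + r - l = r := by ring
      rw [hr]
  | case2 l r hnlt =>
      have hfd : PySem.Int.floordiv (l + r + 1) 2 = (l + r + 1) / 2 :=
        PySem.Int.floordiv_eq_ediv_of_pos (by omega)
      rw [PySem.List.pyRange_one_eq_nil (by rw [hfd]; omega)]
      simp

-- The pair list over range [lo, hi) that B's recursion covers.
def pvPairs (s : List Char) (n lo hi : Int) : List (Option Char × Option Char) :=
  (PySem.List.pyRange lo hi 1).map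
    (fun i => (PySem.List.pyGet? s i, PySem.List.pyGet? s (n - 1 - i)))

-- B's divide and conquer = "none on any bad pair in [lo,hi), else the total score".
theorem pvSolve_eq_range (s : List Char) (n lo hi : Int) :
    pvSolve s n lo hi =
      (if (pvPairs s n lo hi).any pvBad then none
       else some ((pvPairs s n lo hi).map pvScore).sum) := by
  by_cases hle : hi ≤ lo
  · rw [pvSolve, if_pos hle, pvPairs, PySem.List.pyRange_one_eq_nil hle]
    simp
  · by_cases h1 : hi = lo + 1
    · subst h1
      rw [pvSolve, if_neg hle, if_pos rfl, pvPairs, PySem.List.pyRange_one_singleton]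
      cases hl : PySem.List.pyGet? s lo with
      | none => simp [pvBad, hl]
      | some a =>
        cases hr : PySem.List.pyGet? s (n - 1 - lo) with
        | none => simp [pvBad, hl, hr]
        | some b =>
          simp only [List.map_cons, List.map_nil, List.any_cons, List.any_nil,
            Bool.or_false, List.sum_cons, List.sum_nil, add_zero]
          by_cases hq : a = '?' ∧ b = '?'
          · have hbad : pvBad (some a, some b) = false := by simp [pvBad, hq.1]
            simp [hl, hr, hq, pvBad, pvScore]
          · by_cases hq1 : a = '?' ∨ b = '?'
            · have hbad : pvBad (some a, some b) = false := by
                rcases hq1 with h | h <;> simp [pvBad, h]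
              simp [hl, hr, hq, hq1, hbad, pvScore]
            · push Not at hq1
              by_cases hne : a = b
              · subst hne
                simp [hl, hr, hq, pvBad, pvScore, hq1.1, hq1.2]
              · simp [hl, hr, pvBad, hq1.1, hq1.2, hne]
    · have hfd : PySem.Int.floordiv (lo + hi) 2 = (lo + hi) / 2 :=
        PySem.Int.floordiv_eq_ediv_of_pos (by omega)
      have hlm : lo ≤ PySem.Int.floordiv (lo + hi) 2 := by rw [hfd]; omega
      have hmh : PySem.Int.floordiv (lo + hi) 2 ≤ hi := by rw [hfd]; omega
      have IH1 := pvSolve_eq_range s n lo (PySem.Int.floordiv (lo + hi) 2)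
      have IH2 := pvSolve_eq_range s n (PySem.Int.floordiv (lo + hi) 2) hi
      rw [pvSolve, if_neg hle, if_neg h1]
      show (match pvSolve s n lo (PySem.Int.floordiv (lo + hi) 2),
                  pvSolve s n (PySem.Int.floordiv (lo + hi) 2) hi with
            | some L, some R => some (L + R)
            | _, _ => none) = _
      rw [pvPairs, PySem.List.pyRange_one_append lo (PySem.Int.floordiv (lo + hi) 2) hi hlm hmh]
      rw [IH1, IH2, pvPairs, pvPairs]
      simp only [List.map_append, List.any_append, List.sum_append]
      clear IH1 IH2
      split_ifs <;> simp_all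
      rename_i hall1 hall2 hex
      rcases hex with ⟨x, ⟨hx1, hx2⟩, hb⟩ | ⟨x, ⟨hx1, hx2⟩, hb⟩
      · exact absurd (hall1 x hx1 hx2) (by simp [hb])
      · exact absurd (hall2 x hx1 hx2) (by simp [hb])
termination_by (hi - lo).toNat
decreasing_by
  all_goals
    have h2 : PySem.Int.floordiv (lo + hi) 2 = (lo + hi) / 2 :=
      PySem.Int.floordiv_eq_ediv_of_pos (by omega)
    omega

-- ===== VERDICT (by name: the statement is the Claim_ definition above) =====
theorem min_queries_to_check_palindrome_spec : Claim_equal_min_queries_to_check_palindrome := by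
  intro n t _ _
  unfold Spec_min_queries_to_check_palindrome min_queries_to_check_palindrome
    min_queries_to_check_palindrome_alt
  rw [pvALoop_eq_win, pvWin_eq_range, pvSolve_eq_range, pvPairs]
  have h1 : (0 : Int) + (n - 1) + 1 = n := by ring
  have h2 : (fun i => (PySem.List.pyGet? t.toList i, PySem.List.pyGet? t.toList (0 + (n - 1) - i)))
      = fun i => (PySem.List.pyGet? t.toList i, PySem.List.pyGet? t.toList (n - 1 - i)) := by
    funext i; congr 2; ring
  rw [h1, h2]
  split <;> simp
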